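-- pv_equiv track=rewrite | github.com/Randall-Holmes/Randall-Holmes.github.io | Lestrade/Lestrade and Automath (backups)/automath/automath-flagship-3-28.py | Restident
-- ===== SOURCE A (Python) =====
-- def isupper(l):  return l <= 'Z' and l >= 'A'
--
-- def islower(l):  return l <= 'z' and l >= 'a'
--
-- def isdigit(l):  return (l <= '9' and l>='0')
--
-- def isident(s):
--
--     #return islowerident(s) or ((len(s)>0) and isupper(s[0]) and ((len(s)==1) or isident(s[1:]) or (len(s)==2 and (s[1]=='$' or s[1]=='!'))))
--     return (len(s)>0 and (isdigit(s[0]) or isupper(s[0]) or islower(s[0]) or s[0]=='#') and ((len(s)==1) or (len(s)==2 and (s[1]=='$' or s[1]=='!')) or isident(s[1:])))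
--
-- def Getident0(s,n):
--     if s[0:1]=="'":
--         i=1
--         while(len(s)>i and not(s[i]=="'")):
--             i=i+1
--         if s[i]=="'":  return s[0:i+1]
--         return 'ERROR'
--     if s[0:1]=='~' and isident(s[1:]): return Getident0(s[1:],n)
--     if isident(s):  return s
--     if not isident(s[0:n]):  return 'ERROR'
--     if not isident(s[0:n+1]):  return s[0:n]
--     return Getident0(s,n+1)
--
-- def Restident(s):
--     A=Getident0(s,1)
--     if A=='ERROR':  return s
--     R=s[len(A):]
--     if not R[0:1]=='"':  return R
--     RR = R[1:]
--     while not RR == '' and not RR[0:1]=='"':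
--         RR=RR[1:]
--     if RR == '': return 'ERROR'
--     return s[len(A)+len(R)-len(RR)+1:]
-- ===== SOURCE B (Python) =====
-- # B: single linear scan over the string (no recursive isident re-validation of every prefix).
-- # Intended difference (D_): on '~'+identifier inputs A mis-slices after stripping the '~'
-- # and returns a trailing fragment of the input; B returns the true (empty) remainder.
-- # Pre_ excludes inputs whose leading identifier is literally 'ERROR' (A's sentinel collides
-- # with a genuine identifier there) and unterminated leading quotes (A raises IndexError).
-- def _alnum(c):
--     return '0' <= c <= '9' or 'A' <= c <= 'Z' or 'a' <= c <= 'z' or c == '#'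
--
-- def _scan_until(s, ch, j):
--     while j < len(s) and s[j] != ch:
--         j += 1
--     return j
--
-- def _rest_after(s, end):
--     r = s[end:]
--     if r[:1] != '"':
--         return r
--     k = _scan_until(r, '"', 1)
--     if k == len(r):
--         return 'ERROR'
--     return r[k + 1:]
--
-- def Restident(s):
--     n = len(s)
--     if s[:1] == "'":
--         j = _scan_until(s, "'", 1)
--         if j == n:
--             return s  # unterminated quote (A raises IndexError here; excluded by Pre_)
--         return _rest_after(s, j + 1)
--     if s[:1] == '~':
--         i = 1
--         while i < n and _alnum(s[i]):
--             i += 1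
--         if i == 1:
--             return s
--         if i < n and (s[i] == '$' or s[i] == '!'):
--             i += 1
--         return '' if i == n else s
--     i = 0
--     while i < n and _alnum(s[i]):
--         i += 1
--     if i == 0:
--         return s
--     if i < n and (s[i] == '$' or s[i] == '!'):
--         i += 1
--     return _rest_after(s, i)
-- ===== Notes on version B (the rewrite author's own statement) =====
-- stated objective: faster
-- what changed: A re-validates every candidate prefix with a recursive isident on fresh slices (and walks the tail by repeated slicing); B finds the token boundary and the closing quote with single index scans, no recursion and no slice re-validation.
-- intended difference: On inputs that are '~' followed by one complete identifier, A strips the '~' but slices the remainder by the shortened token's length and so returns a trailing fragment of the input (e.g. 'b' for '~ab'); B returns the true empty remainder after the token, the intended value. — e.g. on Restident("~ab"): A returns "b", B returns ""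
-- outside the precondition, e.g. on Restident('ERROR x'): A returns 'ERROR x', B returns ' x'; on Restident('ERROR'): A returns 'ERROR', B returns ''
import Mathlib
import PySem

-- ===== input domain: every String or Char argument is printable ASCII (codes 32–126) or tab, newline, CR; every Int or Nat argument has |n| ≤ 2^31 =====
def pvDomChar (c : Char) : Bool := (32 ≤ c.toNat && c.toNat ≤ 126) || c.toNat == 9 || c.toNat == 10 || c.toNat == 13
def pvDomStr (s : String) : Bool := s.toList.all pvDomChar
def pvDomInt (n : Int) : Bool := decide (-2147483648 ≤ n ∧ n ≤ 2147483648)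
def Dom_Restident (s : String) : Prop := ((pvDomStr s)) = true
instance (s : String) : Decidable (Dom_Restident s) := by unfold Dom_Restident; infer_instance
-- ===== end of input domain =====

-- B is a single linear scan; A re-checks every candidate prefix with a recursive isident
-- (repeated slicing). Ports work on s.toList (Python str ops are exact on the ASCII domain).

-- ===== PORT A =====
def pvERR : List Char := ['E', 'R', 'R', 'O', 'R']

def isupperA (l : Char) : Bool := l ≤ 'Z' && l ≥ 'A'
def islowerA (l : Char) : Bool := l ≤ 'z' && l ≥ 'a'
def isdigitA (l : Char) : Bool := l ≤ '9' && l ≥ '0'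

def isidentA : List Char → Bool
  | [] => false
  | c :: rest =>
    (isdigitA c || isupperA c || islowerA c || c == '#') &&
    (rest.isEmpty || (rest.length == 1 && (rest.headD ' ' == '$' || rest.headD ' ' == '!')) ||
      isidentA rest)

-- the `while len(s)>i and not s[i]=="'"` loop of Getident0
def qloopA (s : List Char) (i : Nat) : Nat :=
  if i < s.length ∧ s.getD i ' ' ≠ '\'' then qloopA s (i + 1) else i
termination_by s.length - i
decreasing_by omega

def getident0A (s : List Char) (n : Nat) : List Char :=
  if s.take 1 = ['\''] then
    let i := qloopA s 1
    if i < s.length ∧ s.getD i ' ' = '\'' then s.take (i + 1)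
    else if i < s.length then pvERR
    else pvERR  -- Python raises IndexError here (s[i], i = len(s)); excluded by Pre_Restident
  else if s.take 1 = ['~'] ∧ isidentA (s.drop 1) = true then getident0A (s.drop 1) n
  else if isidentA s then s
  else if ¬ isidentA (s.take n) then pvERR
  else if ¬ isidentA (s.take (n + 1)) then s.take n
  else getident0A s (n + 1)
termination_by (s.length, s.length + 1 - n)
decreasing_by
  · rename_i h
    have hs : s ≠ [] := by intro he; simp [he] at h
    have : 0 < s.length := List.length_pos_iff.mpr hs
    left; simp; omega
  · rename_i h1 h2 h3 h4
    have hn : n < s.length := by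
      by_contra hle
      have ht : s.take n = s := List.take_of_length_le (by omega)
      rw [ht] at h3
      simp at h2 h3
      simp [h3] at h2
    right; omega

-- the `while not RR=='' and not RR[0:1]=='"'` loop of Restident
def rrloopA : List Char → List Char
  | [] => []
  | c :: rest => if c = '"' then c :: rest else rrloopA rest

def restA (s : List Char) : List Char :=
  let A := getident0A s 1
  if A = pvERR then s
  else
    let R := s.drop A.length
    if ¬ R.take 1 = ['"'] then R
    else
      let RR := rrloopA (R.drop 1)
      if RR = [] then pvERR
      -- Python: s[len(A)+len(R)-len(RR)+1:]; len(RR) ≤ len(R), so Nat subtraction is exact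
      else s.drop (A.length + R.length - RR.length + 1)

def Restident (s : String) : String := String.ofList (restA s.toList)

-- ===== PORT B =====
def alnumB (c : Char) : Bool :=
  ('0' ≤ c && c ≤ '9') || ('A' ≤ c && c ≤ 'Z') || ('a' ≤ c && c ≤ 'z') || c == '#'

def scanUntilB (s : List Char) (ch : Char) (j : Nat) : Nat :=
  if j < s.length ∧ s.getD j ' ' ≠ ch then scanUntilB s ch (j + 1) else j
termination_by s.length - j
decreasing_by omega

def scanAlB (s : List Char) (i : Nat) : Nat :=
  if i < s.length ∧ alnumB (s.getD i ' ') then scanAlB s (i + 1) else i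
termination_by s.length - i
decreasing_by omega

def restAfterB (s : List Char) (e : Nat) : List Char :=
  let r := s.drop e
  if ¬ r.take 1 = ['"'] then r
  else
    let k := scanUntilB r '"' 1
    if k = r.length then pvERR else r.drop (k + 1)

def restB (s : List Char) : List Char :=
  let n := s.length
  if s.take 1 = ['\''] then
    let j := scanUntilB s '\'' 1
    if j = n then s  -- unterminated quote (Python A raises here)
    else restAfterB s (j + 1)
  else if s.take 1 = ['~'] then
    let i := scanAlB s 1
    if i = 1 then s
    else
      let i2 := if i < n ∧ (s.getD i ' ' = '$' ∨ s.getD i ' ' = '!') then i + 1 else i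
      if i2 = n then [] else s
  else
    let i := scanAlB s 0
    if i = 0 then s
    else
      let i2 := if i < n ∧ (s.getD i ' ' = '$' ∨ s.getD i ' ' = '!') then i + 1 else i
      restAfterB s i2

def Restident_alt (s : String) : String := String.ofList (restB s.toList)

-- ===== PRECONDITION & SPEC =====
-- identifier character / shape, used only by Pre_ and D_ (stated via the core Char
-- classifiers and takeWhile/dropWhile, independent of both ports' scanning code)
def identCharD (c : Char) : Bool := c.isDigit || c.isUpper || c.isLower || decide (c = '#')
def identShapeD (t : List Char) : Bool :=
  !(t.takeWhile identCharD).isEmpty &&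
    (t.dropWhile identCharD == [] || t.dropWhile identCharD == ['$'] || t.dropWhile identCharD == ['!'])

-- Pre_ excludes (a) the inputs on which A raises IndexError — a leading single quote with no
-- matching closing quote — and (b) inputs whose leading identifier is literally 'ERROR', where
-- A's string sentinel collides with a genuine identifier of that name and either result is an
-- accident of the sentinel convention (A returns the whole input, B the remainder after it).
def Pre_Restident (s : String) : Prop :=
  (s.toList.head? = some '\'' → '\'' ∈ s.toList.tail) ∧
  ¬ (s.toList.take 5 = ['E', 'R', 'R', 'O', 'R'] ∧
      ((s.toList.drop 5).head?.all fun c => !(identCharD c || c == '$' || c == '!')) = true)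
instance (s : String) : Decidable (Pre_Restident s) := by unfold Pre_Restident; infer_instance

def pvWitness_Restident : String := "abc"

-- On inputs that are '~' followed by one complete identifier, A strips the '~' but then slices
-- the remainder by the shortened token's length, so it returns a trailing fragment of the input
-- instead of the remainder after the token; B returns the true (empty) remainder, the intended value.
def D_Restident (s : String) : Prop :=
  s.toList.head? = some '~' ∧ identShapeD s.toList.tail = true
instance (s : String) : Decidable (D_Restident s) := by unfold D_Restident; infer_instance

def Spec_Restident (s : String) (out : String) : Prop := ¬ D_Restident s → out = Restident_alt s
instance (s : String) (out : String) : Decidable (Spec_Restident s out) := by unfold Spec_Restident; infer_instance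

def pvDiffWitness_Restident : String := "~ab"
def pvDiffWitnessOut_Restident : String × String := ("b", "")

-- ===== CLAIM (what is proved, stated in full; the proofs are below) =====
def Claim_unchanged_Restident : Prop :=
  ∀ (s : String), Dom_Restident s → Pre_Restident s → Spec_Restident s (Restident s)
def Claim_changed_Restident : Prop :=
  Dom_Restident (pvDiffWitness_Restident) ∧ Pre_Restident (pvDiffWitness_Restident) ∧
  D_Restident (pvDiffWitness_Restident) ∧
  Restident (pvDiffWitness_Restident) = pvDiffWitnessOut_Restident.1 ∧
  Restident_alt (pvDiffWitness_Restident) = pvDiffWitnessOut_Restident.2 ∧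
  pvDiffWitnessOut_Restident.1 ≠ pvDiffWitnessOut_Restident.2
def Claim_exact_Restident : Prop :=
  ∀ (s : String), Dom_Restident s → Pre_Restident s → D_Restident s →
    Restident s ≠ Restident_alt s
-- ===== LEMMAS AND PROOFS =====

-- boundary of the leading identifier, shared characterization of both ports
def identEnd (s : List Char) : Nat :=
  if (s.takeWhile alnumB).length < s.length ∧
      (s.getD (s.takeWhile alnumB).length ' ' = '$' ∨ s.getD (s.takeWhile alnumB).length ' ' = '!')
  then (s.takeWhile alnumB).length + 1 else (s.takeWhile alnumB).length

-- ---- scan loops ----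
lemma scanUntil_shift (c ch : Char) : ∀ (rest : List Char) (j : Nat),
    scanUntilB (c :: rest) ch (j + 1) = scanUntilB rest ch j + 1 := by
  intro rest j
  fun_induction scanUntilB rest ch j with
  | case1 j h ih =>
    rw [scanUntilB]
    rw [if_pos (by simpa using ⟨by omega, h.2⟩)]
    exact ih
  | case2 j h =>
    have hn : ¬ (j + 1 < (c :: rest).length ∧ (c :: rest).getD (j + 1) ' ' ≠ ch) := by
      simp only [List.length_cons, List.getD_cons_succ]
      intro hc; exact h ⟨by omega, hc.2⟩
    rw [scanUntilB, if_neg hn]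

lemma scanUntil_cons_zero (c ch : Char) (rest : List Char) :
    scanUntilB (c :: rest) ch 0 = if c = ch then 0 else scanUntilB rest ch 0 + 1 := by
  by_cases hc : c = ch
  · rw [scanUntilB, if_neg (by simp [hc]), if_pos hc]
  · rw [scanUntilB, if_pos (by simp [hc]), if_neg hc, scanUntil_shift]

lemma scanUntil_le (s : List Char) (ch : Char) (j : Nat) (h : j ≤ s.length) :
    scanUntilB s ch j ≤ s.length := by
  fun_induction scanUntilB s ch j with
  | case1 j h ih => exact ih (by omega)
  | case2 j h => exact h

lemma scanUntil_hit (s : List Char) (ch : Char) (j : Nat)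
    (h : scanUntilB s ch j < s.length) : s.getD (scanUntilB s ch j) ' ' = ch := by
  fun_induction scanUntilB s ch j with
  | case1 j hc ih => exact ih h
  | case2 j hc =>
    by_contra hne
    exact hc ⟨h, hne⟩

lemma scanUntil_lt_of_mem (s : List Char) (ch : Char) (j : Nat) (h : ch ∈ s.drop j) :
    scanUntilB s ch j < s.length := by
  fun_induction scanUntilB s ch j with
  | case1 j hc ih =>
    apply ih
    have hdrop : s.drop j = s.getD j ' ' :: s.drop (j + 1) := by
      rw [List.getD_eq_getElem?_getD, List.drop_eq_getElem_cons hc.1]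
      simp [List.getElem?_eq_getElem hc.1]
    rw [hdrop] at h
    rcases List.mem_cons.mp h with h1 | h1
    · exact absurd h1.symm hc.2
    · exact h1
  | case2 j hc =>
    by_cases hj : j < s.length
    · exact hj
    · rw [List.drop_eq_nil_of_le (by omega)] at h
      simp at h

lemma qloop_eq_scanUntil (s : List Char) (i : Nat) : qloopA s i = scanUntilB s '\'' i := by
  fun_induction qloopA s i with
  | case1 i h ih => rw [scanUntilB, if_pos h]; exact ih
  | case2 i h => rw [scanUntilB, if_neg h]

lemma scanAl_shift (c : Char) : ∀ (rest : List Char) (j : Nat),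
    scanAlB (c :: rest) (j + 1) = scanAlB rest j + 1 := by
  intro rest j
  fun_induction scanAlB rest j with
  | case1 j h ih =>
    rw [scanAlB]
    rw [if_pos (by simpa using ⟨by omega, h.2⟩)]
    exact ih
  | case2 j h =>
    have hn : ¬ (j + 1 < (c :: rest).length ∧ alnumB ((c :: rest).getD (j + 1) ' ') = true) := by
      simp only [List.length_cons, List.getD_cons_succ]
      intro hc; exact h ⟨by omega, hc.2⟩
    rw [scanAlB, if_neg hn]

lemma scanAl_zero (s : List Char) : scanAlB s 0 = (s.takeWhile alnumB).length := by
  induction s with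
  | nil => rw [scanAlB]; simp
  | cons c rest ih =>
    by_cases hc : alnumB c = true
    · rw [scanAlB, if_pos (by simp [hc]), scanAl_shift, ih,
        List.takeWhile_cons_of_pos hc, List.length_cons]
    · rw [scanAlB, if_neg (by simp [hc]), List.takeWhile_cons_of_neg (by simp [hc])]
      rfl

lemma rrloop_eq_drop_scan (s : List Char) : rrloopA s = s.drop (scanUntilB s '"' 0) := by
  induction s with
  | nil => simp [rrloopA]
  | cons c rest ih =>
    rw [scanUntil_cons_zero]
    by_cases hc : c = '"'
    · simp [rrloopA, hc]
    · rw [if_neg hc, List.drop_succ_cons, rrloopA, if_neg hc, ih]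

-- ---- identifier shape ----
lemma alnumA_eq (c : Char) :
    (isdigitA c || isupperA c || islowerA c || c == '#') = alnumB c := by
  rw [Bool.eq_iff_iff]
  simp [isdigitA, isupperA, islowerA, alnumB, ge_iff_le]
  tauto

lemma identCharD_eq (c : Char) : identCharD c = alnumB c := by
  rw [Bool.eq_iff_iff]
  simp [identCharD, alnumB, Char.isDigit, Char.isUpper, Char.isLower, Char.le_def, ge_iff_le]

lemma isident_iff (t : List Char) : isidentA t = true ↔
    (t.takeWhile alnumB ≠ [] ∧
      (t.dropWhile alnumB = [] ∨ t.dropWhile alnumB = ['$'] ∨ t.dropWhile alnumB = ['!'])) := by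
  induction t with
  | nil => simp [isidentA]
  | cons c rest ih =>
    by_cases hc : alnumB c = true
    · rw [List.takeWhile_cons_of_pos hc, List.dropWhile_cons_of_pos hc]
      rw [isidentA, alnumA_eq, hc, Bool.true_and]
      simp only [Bool.or_eq_true, Bool.and_eq_true, beq_iff_eq, List.isEmpty_iff, ne_eq,
        reduceCtorEq, not_false_iff, true_and]
      constructor
      · rintro ((h | ⟨h1, h2⟩) | h)
        · subst h; simp
        · obtain ⟨x, rfl⟩ := List.length_eq_one_iff.mp h1
          simp only [List.headD_cons] at h2
          have hx : alnumB x = false := by rcases h2 with rfl | rfl <;> decide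
          rw [List.dropWhile_cons_of_neg (by simp [hx])]
          rcases h2 with rfl | rfl <;> simp
        · exact (ih.mp h).2
      · intro hd
        by_cases hrest : rest.takeWhile alnumB = []
        · have hdw : rest.dropWhile alnumB = rest := by
            conv_rhs => rw [← List.takeWhile_append_dropWhile (p := alnumB) (l := rest)]
            rw [hrest, List.nil_append]
          rw [hdw] at hd
          rcases hd with h | h | h
          · left; left; exact h
          · left; right; subst h; simp
          · left; right; subst h; simp
        · right; exact ih.mpr ⟨hrest, hd⟩
    · rw [isidentA, alnumA_eq, (by simpa using hc : alnumB c = false), Bool.false_and]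
      rw [List.takeWhile_cons_of_neg (by simp [hc])]
      simp

lemma isident_head (c : Char) (t : List Char) (h : isidentA (c :: t) = true) :
    alnumB c = true := by
  rw [isidentA, alnumA_eq, Bool.and_eq_true] at h
  exact h.1

lemma isident_singleton (c : Char) : isidentA [c] = alnumB c := by
  rw [isidentA, alnumA_eq]
  simp [isidentA]

-- ---- takeWhile utilities ----
lemma twl_le (s : List Char) : (s.takeWhile alnumB).length ≤ s.length :=
  (List.takeWhile_sublist _).length_le

lemma twl_take (s : List Char) (n : Nat) :
    ((s.take n).takeWhile alnumB).length = min n (s.takeWhile alnumB).length := by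
  rw [← List.take_takeWhile, List.length_take]

lemma dwl_eq (s : List Char) :
    (s.dropWhile alnumB).length = s.length - (s.takeWhile alnumB).length := by
  have h := congrArg List.length (List.takeWhile_append_dropWhile (p := alnumB) (l := s))
  rw [List.length_append] at h
  omega

lemma getD_twl (s : List Char) (h : (s.takeWhile alnumB).length < s.length) :
    s.getD (s.takeWhile alnumB).length ' ' = (s.dropWhile alnumB).headD ' ' := by
  set k := (s.takeWhile alnumB).length with hk
  rw [List.getD_eq_getElem?_getD]
  conv_lhs => rw [← List.takeWhile_append_dropWhile (p := alnumB) (l := s)]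
  rw [List.getElem?_append_right hk.ge, hk, Nat.sub_self, ← List.head?_eq_getElem?]
  cases hdw : s.dropWhile alnumB <;> simp

lemma getD_twl_not_al (s : List Char) (h : (s.takeWhile alnumB).length < s.length) :
    alnumB (s.getD (s.takeWhile alnumB).length ' ') = false := by
  rw [getD_twl s h]
  have hdw : s.dropWhile alnumB ≠ [] := by
    intro he
    have := dwl_eq s
    rw [he] at this
    simp at this
    omega
  have hx := List.head_dropWhile_not (p := alnumB) (l := s) hdw
  obtain ⟨x, xs, hxs⟩ := List.exists_cons_of_ne_nil hdw
  simp only [hxs, List.head_cons] at hx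
  rw [hxs, List.headD_cons]
  simpa using hx

lemma getD_lt_twl_al (s : List Char) (m : Nat) (h : m < (s.takeWhile alnumB).length) :
    alnumB (s.getD m ' ') = true := by
  have hmem : (s.takeWhile alnumB)[m]'h ∈ s.takeWhile alnumB := List.getElem_mem h
  have hal := List.mem_takeWhile_imp hmem
  have hg : s[m]? = some ((s.takeWhile alnumB)[m]'h) := by
    conv_lhs => rw [← List.takeWhile_append_dropWhile (p := alnumB) (l := s)]
    rw [List.getElem?_append_left h, List.getElem?_eq_getElem h]
  rw [List.getD_eq_getElem?_getD, hg]
  simpa using hal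

lemma identEnd_le (s : List Char) : identEnd s ≤ s.length := by
  have := twl_le s; unfold identEnd; split <;> omega

lemma identEnd_of_ident (s : List Char) (h : isidentA s = true) : identEnd s = s.length := by
  obtain ⟨htw, hdw⟩ := (isident_iff s).mp h
  have hlen := dwl_eq s
  have htwle := twl_le s
  rcases hdw with h1 | h1 | h1
  · have h0 : (s.takeWhile alnumB).length = s.length := by rw [h1] at hlen; simp at hlen; omega
    unfold identEnd
    rw [if_neg (by omega)]
    exact h0
  all_goals
  · have h0 : (s.takeWhile alnumB).length + 1 = s.length := by rw [h1] at hlen; simp at hlen; omega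
    unfold identEnd
    rw [if_pos ⟨by omega, by rw [getD_twl s (by omega), h1]; simp⟩]
    exact h0

-- ---- A's token extractor ----
lemma take_head_al (s : List Char) (n : Nat) (h : isidentA (s.take n) = true) :
    ∃ c t, s = c :: t ∧ alnumB c = true := by
  cases s with
  | nil => rw [List.take_nil] at h; exact absurd h (by decide)
  | cons c t =>
    cases n with
    | zero => rw [List.take_zero] at h; exact absurd h (by decide)
    | succ m => rw [List.take_succ_cons] at h; exact ⟨c, t, rfl, isident_head _ _ h⟩

lemma dw_singleton (u : List Char) (h : (u.dropWhile alnumB).length = 1) :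
    u.dropWhile alnumB = [u.getD (u.takeWhile alnumB).length ' '] := by
  obtain ⟨x, hx⟩ := List.length_eq_one_iff.mp h
  have hlt : (u.takeWhile alnumB).length < u.length := by
    have h1 := dwl_eq u; have h2 := twl_le u; omega
  rw [getD_twl u hlt, hx]; simp

lemma getD_take (s : List Char) (m i : Nat) (h : i < m) :
    (s.take m).getD i ' ' = s.getD i ' ' := by
  rw [List.getD_eq_getElem?_getD, List.getD_eq_getElem?_getD, List.getElem?_take, if_pos h]

lemma take_one_ne_of_al (c : Char) (t : List Char) (hal : alnumB c = true) (x : Char)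
    (hx : alnumB x = false) : ¬ (c :: t).take 1 = [x] := by
  intro hcontra
  rw [List.take_succ_cons, List.take_zero] at hcontra
  have : c = x := by simpa using hcontra
  rw [this, hx] at hal; exact absurd hal (by simp)

lemma identEnd_eq_n (s : List Char) (n : Nat)
    (hident : isidentA (s.take n) = true)
    (hs : ¬ isidentA s = true)
    (h5 : ¬ isidentA (s.take (n + 1)) = true) : identEnd s = n := by
  have hn1 : 1 ≤ n := by
    rcases n with _ | m
    · rw [List.take_zero] at hident; exact absurd hident (by decide)
    · omega
  have hnlen : n ≤ s.length := by
    by_contra hgt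
    rw [List.take_of_length_le (by omega)] at hident
    exact hs hident
  obtain ⟨htw, hdw⟩ := (isident_iff _).mp hident
  have hlen_take : (s.take n).length = n := by rw [List.length_take]; omega
  have htwl_take : ((s.take n).takeWhile alnumB).length = min n (s.takeWhile alnumB).length :=
    twl_take s n
  have hdwl_take := dwl_eq (s.take n)
  have hk_le := twl_le s
  rcases hdw with hdw1 | hdw1 | hdw1
  · -- all-alnum prefix of length n
    have hmin : min n (s.takeWhile alnumB).length = n := by
      rw [hdw1] at hdwl_take; simp at hdwl_take; omega
    have hkn : n ≤ (s.takeWhile alnumB).length := by omega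
    have hnlt : n < s.length := by
      rcases Nat.lt_or_ge n s.length with h | h
      · exact h
      · exfalso
        have hkeq : (s.takeWhile alnumB).length = s.length := by omega
        have hdnil : s.dropWhile alnumB = [] := by
          have := dwl_eq s
          exact List.eq_nil_of_length_eq_zero (by omega)
        exact hs ((isident_iff s).mpr ⟨by
          intro hte; rw [hte] at hkeq; simp at hkeq; omega, Or.inl hdnil⟩)
    have hkn' : (s.takeWhile alnumB).length = n := by
      by_contra hne
      have hk1 : n + 1 ≤ (s.takeWhile alnumB).length := by omega
      apply h5
      apply (isident_iff _).mpr
      have hlen1 : (s.take (n + 1)).length = n + 1 := by rw [List.length_take]; omega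
      have htwl1 : ((s.take (n + 1)).takeWhile alnumB).length = n + 1 := by
        rw [twl_take]; omega
      have hdwl1 := dwl_eq (s.take (n + 1))
      refine ⟨?_, Or.inl (List.eq_nil_of_length_eq_zero (by omega))⟩
      intro hte; rw [hte] at htwl1; simp at htwl1
    have hcond : ¬ (s.getD (s.takeWhile alnumB).length ' ' = '$' ∨
        s.getD (s.takeWhile alnumB).length ' ' = '!') := by
      intro hcontra
      apply h5
      apply (isident_iff _).mpr
      have hlen1 : (s.take (n + 1)).length = n + 1 := by rw [List.length_take]; omega
      have htwl1 : ((s.take (n + 1)).takeWhile alnumB).length = n := by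
        rw [twl_take]; omega
      have hdwl1 : ((s.take (n + 1)).dropWhile alnumB).length = 1 := by
        have := dwl_eq (s.take (n + 1)); omega
      have hsing := dw_singleton (s.take (n + 1)) hdwl1
      rw [htwl1, getD_take s (n + 1) n (by omega)] at hsing
      refine ⟨?_, ?_⟩
      · intro hte; rw [hte] at htwl1; simp at htwl1; omega
      · rw [hsing, ← hkn']
        rcases hcontra with hc | hc
        · right; left; rw [hkn', ← hkn'] at hc ⊢; rw [hc]
        · right; right; rw [hc]
    unfold identEnd
    rw [if_neg (by intro hcontra; exact hcond hcontra.2)]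
    exact hkn'
  all_goals
  · -- prefix is alnum* followed by one '$' or '!'
    have hd1 : ((s.take n).dropWhile alnumB).length = 1 := by rw [hdw1]; rfl
    have hmin : min n (s.takeWhile alnumB).length = n - 1 := by omega
    have hkn : (s.takeWhile alnumB).length = n - 1 := by
      rcases Nat.lt_or_ge (s.takeWhile alnumB).length n with h | h
      · omega
      · omega
    have hsing := dw_singleton (s.take n) (by omega)
    rw [htwl_take, hmin, getD_take s n (n - 1) (by omega)] at hsing
    rw [hdw1] at hsing
    have hgd : s.getD (n - 1) ' ' = _ := (List.cons.injEq _ _ _ _).mp hsing.symm |>.1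
    unfold identEnd
    rw [if_pos ⟨by omega, by rw [hkn, hgd]; simp⟩]
    omega

lemma getident0_eq : ∀ (s : List Char) (n : Nat), isidentA (s.take n) = true →
    getident0A s n = s.take (identEnd s) := by
  intro s₀ n₀
  induction s₀, n₀ using getident0A.induct with
  | case1 s n hq _ _ =>
    intro hident
    obtain ⟨c, t, rfl, hal⟩ := take_head_al s n hident
    exact absurd hq (take_one_ne_of_al c t hal '\'' (by decide))
  | case2 s n hq _ _ =>
    intro hident
    obtain ⟨c, t, rfl, hal⟩ := take_head_al s n hident
    exact absurd hq (take_one_ne_of_al c t hal '\'' (by decide))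
  | case3 s n hq _ _ =>
    intro hident
    obtain ⟨c, t, rfl, hal⟩ := take_head_al s n hident
    exact absurd hq (take_one_ne_of_al c t hal '\'' (by decide))
  | case4 s n h1 h2 _ =>
    intro hident
    obtain ⟨c, t, rfl, hal⟩ := take_head_al s n hident
    exact absurd h2.1 (take_one_ne_of_al c t hal '~' (by decide))
  | case5 s n h1 h2 h3 =>
    intro _
    rw [getident0A, if_neg h1, if_neg h2, if_pos h3, identEnd_of_ident s h3, List.take_length]
  | case6 s n h1 h2 h3 h4 =>
    intro hident
    exact absurd hident h4
  | case7 s n h1 h2 h3 h4 h5 =>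
    intro hident
    rw [getident0A, if_neg h1, if_neg h2, if_neg h3, if_neg h4, if_pos h5,
      identEnd_eq_n s n hident h3 h5]
  | case8 s n h1 h2 h3 h4 h5 ih =>
    intro _
    rw [getident0A, if_neg h1, if_neg h2, if_neg h3, if_neg h4, if_neg h5]
    exact ih (not_not.mp h5)

-- ---- shared tail handling ----
lemma restAfter_eq (s : List Char) (e : Nat) (he : e ≤ s.length) :
    (let R := s.drop e;
     if ¬ R.take 1 = ['"'] then R
     else
       let RR := rrloopA (R.drop 1)
       if RR = [] then pvERR
       else s.drop (e + R.length - RR.length + 1)) = restAfterB s e := by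
  simp only [restAfterB]
  by_cases hq : (s.drop e).take 1 = ['"']
  · rw [if_neg (not_not_intro hq), if_neg (not_not_intro hq)]
    obtain ⟨a, r', hr⟩ : ∃ a r', s.drop e = a :: r' := by
      cases hcase : s.drop e with
      | nil => rw [hcase] at hq; simp at hq
      | cons a r' => exact ⟨a, r', rfl⟩
    have ha : a = '"' := by rw [hr] at hq; simpa using hq
    subst ha
    have hq0le := scanUntil_le r' '"' 0 (Nat.zero_le _)
    have hshift : scanUntilB (s.drop e) '"' 1 = scanUntilB r' '"' 0 + 1 := by
      rw [hr, scanUntil_shift]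
    have hdrop1 : (s.drop e).drop 1 = r' := by rw [hr, List.drop_succ_cons, List.drop_zero]
    have hlenr : (s.drop e).length = r'.length + 1 := by rw [hr, List.length_cons]
    rw [hdrop1, rrloop_eq_drop_scan, hshift]
    by_cases hend : scanUntilB r' '"' 0 = r'.length
    · rw [if_pos (by rw [hend, List.drop_length]), if_pos (by omega)]
    · have hlt : scanUntilB r' '"' 0 < r'.length := by omega
      have hRRlen : (r'.drop (scanUntilB r' '"' 0)).length = r'.length - scanUntilB r' '"' 0 :=
        List.length_drop
      rw [if_neg (by
          intro hnil
          rw [hnil] at hRRlen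
          simp at hRRlen
          omega),
        if_neg (by omega)]
      rw [List.drop_drop]
      congr 1
      have h1 : (s.drop e).length = s.length - e := List.length_drop
      omega
  · rw [if_pos hq, if_pos hq]

lemma identCharD_fun_eq : identCharD = alnumB := funext identCharD_eq

lemma isident_eq_shape (t : List Char) : isidentA t = identShapeD t := by
  rw [Bool.eq_iff_iff, isident_iff, identShapeD, identCharD_fun_eq]
  simp only [Bool.and_eq_true, Bool.or_eq_true, beq_iff_eq, Bool.not_eq_true',
    List.isEmpty_iff, ne_eq]
  constructor
  · rintro ⟨h1, h2⟩
    exact ⟨List.isEmpty_eq_false_iff.mpr h1, by tauto⟩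
  · rintro ⟨h1, h2⟩
    exact ⟨List.isEmpty_eq_false_iff.mp h1, by tauto⟩

lemma isident_cons_not_al (c : Char) (t : List Char) (hc : alnumB c = false) :
    isidentA (c :: t) = false := by
  rw [isidentA, alnumA_eq, hc, Bool.false_and]

lemma identEnd_pos (c : Char) (t : List Char) (hc : alnumB c = true) :
    1 ≤ identEnd (c :: t) := by
  have : 1 ≤ ((c :: t).takeWhile alnumB).length := by
    rw [List.takeWhile_cons_of_pos hc, List.length_cons]; omega
  unfold identEnd
  split <;> omega

lemma tok_err_excluded (l : List Char) (htok : l.take (identEnd l) = pvERR) :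
    l.take 5 = ['E', 'R', 'R', 'O', 'R'] ∧
      ((l.drop 5).head?.all fun c => !(identCharD c || c == '$' || c == '!')) = true := by
  have hle := identEnd_le l
  have h5 : identEnd l = 5 := by
    have := congrArg List.length htok
    rw [List.length_take] at this
    simp [pvERR] at this
    omega
  refine ⟨by rw [← h5]; exact htok, ?_⟩
  cases hd : (l.drop 5).head? with
  | none => rfl
  | some c5 =>
    have hlen5 : 5 < l.length := by
      by_contra hge
      rw [List.drop_eq_nil_of_le (by omega)] at hd
      simp at hd
    have hc5 : l.getD 5 ' ' = c5 := by
      rw [List.getD_eq_getElem?_getD, ← List.head?_drop, hd]; rfl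
    have hR4 : l.getD 4 ' ' = 'R' := by
      have h4 := congrArg (fun u => u.getD 4 ' ') htok
      simp only at h4
      rw [getD_take l (identEnd l) 4 (by omega)] at h4
      exact h4
    unfold identEnd at h5
    split at h5 <;> rename_i hcond
    · exfalso
      have hk4 : (l.takeWhile alnumB).length = 4 := by omega
      rw [hk4, hR4] at hcond
      rcases hcond.2 with h | h <;> simp at h
    · have hk5 : (l.takeWhile alnumB).length = 5 := h5
      have hnal : alnumB (l.getD 5 ' ') = false := by
        have hx := getD_twl_not_al l (by omega)
        rwa [hk5] at hx
      push_neg at hcond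
      have hns := hcond (by omega)
      rw [hk5] at hns
      rw [Option.all_some]
      rw [hc5] at hnal hns
      simp [identCharD_eq, hnal, hns.1, hns.2]

lemma take_one_ne (c : Char) (t : List Char) (x : Char) (h : c ≠ x) :
    ¬ (c :: t).take 1 = [x] := by
  intro hc
  rw [List.take_succ_cons, List.take_zero] at hc
  exact h (by simpa using hc)

lemma not_shape (t : List Char) (hsh : isidentA t = false) :
    ¬ (t.takeWhile alnumB ≠ [] ∧ (t.dropWhile alnumB = [] ∨ t.dropWhile alnumB = ['$'] ∨
      t.dropWhile alnumB = ['!'])) := by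
  intro hX
  rw [(isident_iff t).mpr hX] at hsh
  exact absurd hsh (by simp)

lemma restAB (l : List Char)
    (hPre : l.head? = some '\'' → '\'' ∈ l.tail)
    (hNoErr : ¬ (l.take 5 = ['E', 'R', 'R', 'O', 'R'] ∧
      ((l.drop 5).head?.all fun c => !(identCharD c || c == '$' || c == '!')) = true))
    (hD1 : ¬ (l.head? = some '~' ∧ identShapeD l.tail = true)) :
    restA l = restB l := by
  cases l with
  | nil => simp [restA, restB, getident0A, isidentA, scanAlB, pvERR]
  | cons c t =>
    by_cases hcq : c = '\''
    · subst hcq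
      have hmem : '\'' ∈ ('\'' :: t).drop 1 := by simpa using hPre rfl
      set i := scanUntilB ('\'' :: t) '\'' 1 with hi
      have hilt : i < ('\'' :: t).length := scanUntil_lt_of_mem _ _ _ hmem
      have hihit : ('\'' :: t).getD i ' ' = '\'' := scanUntil_hit _ _ _ hilt
      have hA : getident0A ('\'' :: t) 1 = ('\'' :: t).take (i + 1) := by
        rw [getident0A, if_pos (show List.take 1 ('\'' :: t) = ['\''] from rfl),
          qloop_eq_scanUntil, ← hi, if_pos ⟨hilt, hihit⟩]
      have htokne : ('\'' :: t).take (i + 1) ≠ pvERR := by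
        intro hcontra
        rw [List.take_succ_cons, pvERR] at hcontra
        injection hcontra with h1 _
        exact absurd h1 (by decide)
      have htoklen : (('\'' :: t).take (i + 1)).length = i + 1 := by
        rw [List.length_take]; omega
      have hresA : restA ('\'' :: t) = restAfterB ('\'' :: t) (i + 1) := by
        simp only [restA]
        rw [hA, if_neg htokne, htoklen]
        exact restAfter_eq _ _ (by omega)
      have hresB : restB ('\'' :: t) = restAfterB ('\'' :: t) (i + 1) := by
        simp only [restB]
        rw [if_pos (show List.take 1 ('\'' :: t) = ['\''] from rfl), ← hi, if_neg (by omega)]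
      rw [hresA, hresB]
    · by_cases hal : alnumB c = true
      · have h1 : isidentA ((c :: t).take 1) = true := by
          rw [List.take_succ_cons, List.take_zero, isident_singleton, hal]
        have hA := getident0_eq (c :: t) 1 h1
        have hele : identEnd (c :: t) ≤ (c :: t).length := identEnd_le _
        have hepos : 1 ≤ identEnd (c :: t) := identEnd_pos c t hal
        have htokne : (c :: t).take (identEnd (c :: t)) ≠ pvERR := by
          intro hcontra
          exact hNoErr (tok_err_excluded _ hcontra)
        have htoklen : ((c :: t).take (identEnd (c :: t))).length = identEnd (c :: t) := by
          rw [List.length_take]; omega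
        have hresA : restA (c :: t) = restAfterB (c :: t) (identEnd (c :: t)) := by
          simp only [restA]
          rw [hA, if_neg htokne, htoklen]
          exact restAfter_eq _ _ hele
        have hresB : restB (c :: t) = restAfterB (c :: t) (identEnd (c :: t)) := by
          simp only [restB]
          rw [if_neg (take_one_ne_of_al c t hal '\'' (by decide)),
            if_neg (take_one_ne_of_al c t hal '~' (by decide)), scanAl_zero,
            if_neg (show ¬ ((c :: t).takeWhile alnumB).length = 0 by
              rw [List.takeWhile_cons_of_pos hal]; simp)]
          unfold identEnd
          rfl
        rw [hresA, hresB]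
      · by_cases hct : c = '~'
        · subst hct
          have hsh : identShapeD t = false := by
            by_contra hne
            rw [Bool.not_eq_false] at hne
            exact hD1 ⟨rfl, by simpa using hne⟩
          have hident_t : isidentA t = false := by rw [isident_eq_shape]; exact hsh
          have hnX := not_shape t hident_t
          have hA : getident0A ('~' :: t) 1 = pvERR := by
            rw [getident0A, if_neg (take_one_ne '~' t '\'' (by decide)),
              if_neg (by intro hcontra; rw [List.drop_succ_cons, List.drop_zero, hident_t] at hcontra; exact absurd hcontra.2 (by simp)),
              if_neg (by rw [isident_cons_not_al '~' t (by decide)]; simp),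
              if_pos (by rw [List.take_succ_cons, List.take_zero, isident_singleton]; decide)]
          have hresA : restA ('~' :: t) = '~' :: t := by
            simp only [restA]; rw [hA, if_pos (show pvERR = pvERR from rfl)]
          rw [hresA]
          simp only [restB]
          rw [if_neg (take_one_ne '~' t '\'' (by decide)),
            if_pos (show List.take 1 ('~' :: t) = ['~'] from rfl), scanAl_shift, scanAl_zero]
          by_cases htw : (t.takeWhile alnumB).length = 0
          · rw [if_pos (by omega)]
          · rw [if_neg (by omega)]
            have htwne : t.takeWhile alnumB ≠ [] := by
              intro hcontra; rw [hcontra] at htw; simp at htw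
            have hdwl := dwl_eq t
            have htwle := twl_le t
            by_cases hcond : (t.takeWhile alnumB).length + 1 < ('~' :: t).length ∧
                (('~' :: t).getD ((t.takeWhile alnumB).length + 1) ' ' = '$' ∨
                  ('~' :: t).getD ((t.takeWhile alnumB).length + 1) ' ' = '!')
            · rw [if_pos hcond, if_neg ?hne2]
              case hne2 =>
                intro hcontra
                rw [List.length_cons] at hcontra
                have hlent : t.length = (t.takeWhile alnumB).length + 1 := by omega
                have hd1 : (t.dropWhile alnumB).length = 1 := by omega
                have hsing := dw_singleton t hd1
                have hgd : ('~' :: t).getD ((t.takeWhile alnumB).length + 1) ' ' =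
                    t.getD (t.takeWhile alnumB).length ' ' := List.getD_cons_succ
                rw [hgd] at hcond
                apply hnX
                refine ⟨htwne, ?_⟩
                rcases hcond.2 with hx | hx
                · right; left; rw [hsing, hx]
                · right; right; rw [hsing, hx]
            · rw [if_neg hcond, if_neg ?hne3]
              case hne3 =>
                intro hcontra
                rw [List.length_cons] at hcontra
                have hdnil : t.dropWhile alnumB = [] :=
                  List.eq_nil_of_length_eq_zero (by omega)
                exact hnX ⟨htwne, Or.inl hdnil⟩
        · have half : alnumB c = false := by rwa [Bool.not_eq_true] at hal
          have hA : getident0A (c :: t) 1 = pvERR := by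
            rw [getident0A, if_neg (take_one_ne c t '\'' hcq),
              if_neg (by intro hcontra; exact hct (by
                have := hcontra.1
                rw [List.take_succ_cons, List.take_zero] at this
                simpa using this)),
              if_neg (by rw [isident_cons_not_al c t half]; simp),
              if_pos (by rw [List.take_succ_cons, List.take_zero, isident_singleton, half]; simp)]
          simp only [restA, restB]
          rw [hA, if_pos (show pvERR = pvERR from rfl), if_neg (take_one_ne c t '\'' hcq),
            if_neg (take_one_ne c t '~' hct), scanAl_zero,
            List.takeWhile_cons_of_neg (by simp [half]),
            if_pos (show ([] : List Char).length = 0 from rfl)]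

lemma getident0_tilde_ab : getident0A ['~', 'a', 'b'] 1 = ['a', 'b'] := by
  have hsub : getident0A ['a', 'b'] 1 = ['a', 'b'] := by
    rw [getident0_eq ['a', 'b'] 1 (by decide), show identEnd ['a', 'b'] = 2 from by decide]
    decide
  calc getident0A ['~', 'a', 'b'] 1 = getident0A ['a', 'b'] 1 := by
        rw [getident0A, if_neg (take_one_ne '~' ['a', 'b'] '\'' (by decide)),
          if_pos ⟨rfl, by decide⟩]
        rfl
    _ = ['a', 'b'] := hsub

lemma shape_head_al (t : List Char) (h : t.takeWhile alnumB ≠ []) :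
    ∃ c' t', t = c' :: t' ∧ alnumB c' = true := by
  cases t with
  | nil => simp at h
  | cons c' t' =>
    by_cases hc : alnumB c' = true
    · exact ⟨c', t', rfl, hc⟩
    · rw [List.takeWhile_cons_of_neg (by simp [hc])] at h
      exact absurd rfl h

lemma getident0_of_ident (t : List Char) (hid : isidentA t = true) :
    getident0A t 1 = t := by
  obtain ⟨htw, hdw⟩ := (isident_iff t).mp hid
  obtain ⟨c', t', rfl, hal⟩ := shape_head_al t htw
  rw [getident0A, if_neg (take_one_ne_of_al c' t' hal '\'' (by decide)),
    if_neg (by intro hc; exact (take_one_ne_of_al c' t' hal '~' (by decide)) hc.1),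
    if_pos hid]

lemma last_char_class (t : List Char) (hsh : identShapeD t = true)
    (hx : t.getD (t.length - 1) ' ' = '"') : False := by
  have hid : isidentA t = true := by rw [isident_eq_shape]; exact hsh
  obtain ⟨htw, hdw⟩ := (isident_iff t).mp hid
  have htwl1 : 1 ≤ (t.takeWhile alnumB).length := by
    have := List.length_pos_iff.mpr htw; omega
  have hdwl := dwl_eq t
  have htwle := twl_le t
  rcases hdw with h | h | h
  · have hk : (t.takeWhile alnumB).length = t.length := by rw [h] at hdwl; simp at hdwl; omega
    have := getD_lt_twl_al t (t.length - 1) (by omega)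
    rw [hx] at this
    exact absurd this (by decide)
  all_goals
  · have hd1 : (t.dropWhile alnumB).length = 1 := by rw [h]; rfl
    have hk : (t.takeWhile alnumB).length = t.length - 1 := by omega
    have hsing := dw_singleton t hd1
    rw [h, hk, hx] at hsing
    simp at hsing

lemma restA_tilde_shape_ne (t : List Char) (hsh : identShapeD t = true) :
    restA ('~' :: t) ≠ [] := by
  have hid : isidentA t = true := by rw [isident_eq_shape]; exact hsh
  have hA : getident0A ('~' :: t) 1 = t := by
    rw [getident0A, if_neg (take_one_ne '~' t '\'' (by decide)), if_pos ⟨rfl, hid⟩]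
    exact getident0_of_ident t hid
  simp only [restA]
  rw [hA]
  by_cases herr : t = pvERR
  · rw [if_pos herr]; exact List.cons_ne_nil _ _
  · rw [if_neg herr]
    have hRlen : (List.drop t.length ('~' :: t)).length = 1 := by
      rw [List.length_drop, List.length_cons]; omega
    have hq : ¬ (List.drop t.length ('~' :: t)).take 1 = ['"'] := by
      intro hq
      have hReq : List.drop t.length ('~' :: t) = ['"'] := by
        rw [← List.take_of_length_le (le_of_eq hRlen)]
        exact hq
      have htne : t ≠ [] := by
        intro he
        rw [he] at hsh
        exact absurd hsh (by decide)
      have hgd : ('~' :: t).getD t.length ' ' = '"' := by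
        have h0 := congrArg (fun u => u.getD 0 ' ') hReq
        simp only [List.getD_cons_zero] at h0
        rw [← h0, List.getD_eq_getElem?_getD, List.getD_eq_getElem?_getD, List.getElem?_drop]
        simp
      have hsucc : t.length = (t.length - 1) + 1 := by
        have := List.length_pos_iff.mpr htne; omega
      rw [hsucc, List.getD_cons_succ] at hgd
      exact last_char_class t hsh hgd
    rw [if_pos hq]
    intro hcontra
    rw [hcontra] at hRlen
    simp at hRlen

lemma restB_tilde_shape (t : List Char) (hsh : identShapeD t = true) :
    restB ('~' :: t) = [] := by
  have hid : isidentA t = true := by rw [isident_eq_shape]; exact hsh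
  obtain ⟨htw, hdw⟩ := (isident_iff t).mp hid
  have htwl1 : 1 ≤ (t.takeWhile alnumB).length := by
    have := List.length_pos_iff.mpr htw; omega
  have hdwl := dwl_eq t
  have htwle := twl_le t
  simp only [restB]
  rw [if_neg (take_one_ne '~' t '\'' (by decide)),
    if_pos (show List.take 1 ('~' :: t) = ['~'] from rfl), scanAl_shift, scanAl_zero,
    if_neg (show ¬ (t.takeWhile alnumB).length + 1 = 1 by omega)]
  rcases hdw with h | h | h
  · have hk : (t.takeWhile alnumB).length = t.length := by rw [h] at hdwl; simp at hdwl; omega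
    split_ifs with h1 h2 h3
    · rfl
    · exfalso; rw [List.length_cons] at h1; omega
    · rfl
    · exfalso; rw [List.length_cons] at h3; omega
  all_goals
  · have hd1 : (t.dropWhile alnumB).length = 1 := by rw [h]; rfl
    have hk : (t.takeWhile alnumB).length = t.length - 1 := by omega
    have hsing := dw_singleton t hd1
    rw [h, hk] at hsing
    have hgd : t.getD (t.length - 1) ' ' = _ := ((List.cons.injEq _ _ _ _).mp hsing.symm).1
    have hgd2 : ('~' :: t).getD ((t.takeWhile alnumB).length + 1) ' ' = t.getD (t.length - 1) ' ' := by
      rw [show (t.takeWhile alnumB).length + 1 = (t.length - 1) + 1 from by omega,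
        List.getD_cons_succ]
    split_ifs with h1 h2 h3
    · rfl
    · exfalso; rw [List.length_cons] at h2; omega
    · rfl
    · exfalso
      apply h1
      constructor
      · rw [List.length_cons]; omega
      · rw [hgd2, hgd]; simp

-- ===== VERDICT (statements are the Claim_ definitions above) =====
theorem Restident_spec : Claim_unchanged_Restident := by
  intro s _ hPre
  unfold Spec_Restident
  intro hND
  unfold Pre_Restident at hPre
  unfold D_Restident at hND
  unfold Restident Restident_alt
  congr 1
  exact restAB s.toList hPre.1 hPre.2 hND

theorem Restident_changed : Claim_changed_Restident := by
  unfold Claim_changed_Restident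
  have htl : ("~ab" : String).toList = ['~', 'a', 'b'] := by decide
  have hA : Restident "~ab" = "b" := by
    unfold Restident
    rw [htl]
    simp only [restA]
    rw [getident0_tilde_ab, if_neg (by decide)]
    decide
  have hB : Restident_alt "~ab" = "" := by
    unfold Restident_alt
    rw [htl]
    simp only [restB]
    rw [if_neg (take_one_ne '~' ['a', 'b'] '\'' (by decide)),
      if_pos (show List.take 1 ['~', 'a', 'b'] = ['~'] from rfl), scanAl_shift, scanAl_zero]
    decide
  exact ⟨by decide, by decide, by decide, hA, hB, by decide⟩

theorem Restident_tight : Claim_exact_Restident := by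
  intro s _ _ hD
  unfold Restident Restident_alt
  intro heq
  have hl := congrArg String.toList heq
  rw [String.toList_ofList, String.toList_ofList] at hl
  unfold D_Restident at hD
  obtain ⟨hh, hsh⟩ := hD
  cases hml : s.toList with
  | nil => rw [hml] at hh; simp at hh
  | cons c t =>
    rw [hml] at hh hsh hl
    have hc : c = '~' := by simpa using hh
    subst hc
    have hsh' : identShapeD t = true := by simpa using hsh
    rw [restB_tilde_shape t hsh'] at hl
    exact restA_tilde_shape_ne t hsh' hl
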